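-- pv_equiv track=rewrite | github.com/GeniusFKT/LeetCode_Python3 | 1023_驼峰式匹配.py | matchOne
-- ===== SOURCE A (Python) =====
-- def matchOne(query: str, pattern: str) -> bool:
--     if len(query) < len(pattern):
--         return False
--     slow = 0
--     for fast in range(len(query)):
--         if slow == len(pattern):
--             for i in range(fast, len(query)):
--                 if 'A' <= query[i] and 'Z' >= query[i]:
--                     return False
--             return True
--         if query[fast] == pattern[slow]:
--             slow += 1
--             continue
--         else:
--             if 'A' <= query[fast] and 'Z' >= query[fast]:
--                 return False
--     if slow == len(pattern):
--         return True
--     else: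
--         return False
-- ===== SOURCE B (Python) =====
-- def matchOne(query: str, pattern: str) -> bool:
--     def split_words(s):
--         # (caps, words): the uppercase letters of s in order, and the
--         # uppercase-free segments around them (len(words) == len(caps) + 1)
--         caps, words, cur = [], [], ''
--         for c in s:
--             if 'A' <= c <= 'Z':
--                 caps.append(c)
--                 words.append(cur)
--                 cur = ''
--             else:
--                 cur += c
--         words.append(cur)
--         return caps, words
--
--     def is_subseq(v, w):
--         # greedy subsequence test: is v a subsequence of w?
--         i = 0
--         for c in w:
--             if i < len(v) and v[i] == c:
--                 i += 1
--         return i == len(v)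
--
--     qcaps, qwords = split_words(query)
--     pcaps, pwords = split_words(pattern)
--     return qcaps == pcaps and all(is_subseq(v, w) for v, w in zip(pwords, qwords))
-- ===== Notes on version B (the rewrite author's own statement) =====
-- stated objective: alternative
-- what changed: Replaces A's single greedy two-pointer scan (with an inner uppercase-check loop and early returns) by the word-split algorithm: both strings are split into their uppercase letters plus the uppercase-free segments around them, the uppercase sequences are compared for equality, and each pattern segment is checked to be a subsequence of the corresponding query segment.
import Mathlib
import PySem

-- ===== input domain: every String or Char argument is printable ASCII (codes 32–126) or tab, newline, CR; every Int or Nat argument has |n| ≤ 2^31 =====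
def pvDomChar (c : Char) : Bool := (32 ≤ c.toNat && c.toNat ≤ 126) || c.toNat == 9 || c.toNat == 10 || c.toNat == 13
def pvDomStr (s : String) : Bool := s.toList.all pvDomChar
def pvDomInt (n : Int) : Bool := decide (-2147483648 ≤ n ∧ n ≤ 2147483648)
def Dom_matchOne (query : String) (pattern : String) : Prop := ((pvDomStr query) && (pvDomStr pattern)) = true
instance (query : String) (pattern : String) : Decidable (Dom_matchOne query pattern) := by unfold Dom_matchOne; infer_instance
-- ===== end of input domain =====

-- B replaces A's single greedy two-pointer scan by the word-split algorithm: both strings are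
-- split into their uppercase letters plus the uppercase-free segments around them, the uppercase
-- sequences are compared, and each pattern segment is checked to be a subsequence of the matching
-- query segment (objective: alternative; same asymptotic cost).

-- ===== PORT A =====
-- 'A' <= c and 'Z' >= c
def pvIsUpper (c : Char) : Bool := 'A' ≤ c && c ≤ 'Z'

-- inner loop: for i in range(fast, len(query)): if uppercase: return False; then return True
def matchOne_tail : List Char → Bool
  | [] => true
  | c :: rest => if pvIsUpper c then false else matchOne_tail rest

-- the main 'for fast in range(len(query))' loop, state = remaining query chars and slow
def matchOne_loop (plist : List Char) : List Char → Nat → Bool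
  | [], slow => decide (slow = plist.length)
  | c :: rest, slow =>
      if slow = plist.length then matchOne_tail (c :: rest)
      else if plist[slow]? = some c then matchOne_loop plist rest (slow + 1)
      else if pvIsUpper c then false
      else matchOne_loop plist rest slow

def matchOne (query : String) (pattern : String) : Bool :=
  if PySem.Str.len query < PySem.Str.len pattern then false
  else matchOne_loop pattern.toList query.toList 0

-- ===== PORT B =====
-- split_words: forward loop with caps/words/cur accumulators
def splitWordsGo : List Char → List Char → List (List Char) → List Char → List Char × List (List Char)
  | [], caps, words, cur => (caps, words ++ [cur])
  | c :: s, caps, words, cur =>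
      if pvIsUpper c then splitWordsGo s (caps ++ [c]) (words ++ [cur]) []
      else splitWordsGo s caps words (cur ++ [c])

-- is_subseq: greedy scan of w advancing an index i into v
def isSubseqGo (v : List Char) : List Char → Nat → Nat
  | [], i => i
  | c :: w, i => if i < v.length ∧ v[i]? = some c then isSubseqGo v w (i + 1) else isSubseqGo v w i

def isSubseq (v w : List Char) : Bool := decide (isSubseqGo v w 0 = v.length)

-- all(is_subseq(v, w) for v, w in zip(pwords, qwords))  (zip truncates)
def allZipSubseq : List (List Char) → List (List Char) → Bool
  | [], _ => true
  | _ :: _, [] => true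
  | v :: vs, w :: ws => isSubseq v w && allZipSubseq vs ws

def matchOne_alt (query : String) (pattern : String) : Bool :=
  let (qcaps, qwords) := splitWordsGo query.toList [] [] []
  let (pcaps, pwords) := splitWordsGo pattern.toList [] [] []
  decide (qcaps = pcaps) && allZipSubseq pwords qwords

-- ===== PRECONDITION & SPEC =====
def Spec_matchOne (query : String) (pattern : String) (out : Bool) : Prop := out = matchOne_alt query pattern
instance (query : String) (pattern : String) (out : Bool) : Decidable (Spec_matchOne query pattern out) := by unfold Spec_matchOne; infer_instance

-- ===== CLAIM (what is proved, stated in full; the proofs are below) =====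
def Claim_equal_matchOne : Prop := ∀ (query : String) (pattern : String), Dom_matchOne query pattern → Spec_matchOne query pattern (matchOne query pattern)

-- ===== LEMMAS AND PROOFS =====

-- head-recursive form of split_words (proof helper)
def splitWords : List Char → List Char × List (List Char)
  | [] => ([], [[]])
  | c :: s =>
      let (caps, words) := splitWords s
      if pvIsUpper c then (c :: caps, [] :: words)
      else (caps, (c :: words.headD []) :: words.tail)

-- structural form of is_subseq (proof helper)
def isSubseqL : List Char → List Char → Bool
  | [], _ => true
  | _ :: _, [] => false
  | a :: v, b :: w => if a = b then isSubseqL v w else isSubseqL (a :: v) w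

-- zip/all over isSubseqL (proof helper)
def allZipSubseqL : List (List Char) → List (List Char) → Bool
  | [], _ => true
  | _ :: _, [] => true
  | v :: vs, w :: ws => isSubseqL v w && allZipSubseqL vs ws

-- A's loop reformulated on the remaining pattern suffix (proof helper)
def aloop : List Char → List Char → Bool
  | [], p => p.isEmpty
  | c :: rest, p =>
      match p with
      | [] => matchOne_tail (c :: rest)
      | d :: p' => if d = c then aloop rest p' else if pvIsUpper c then false else aloop rest (d :: p')

-- B as a function on char lists (proof helper)
def bfun (q p : List Char) : Bool :=
  decide ((splitWords q).1 = (splitWords p).1) && allZipSubseqL (splitWords p).2 (splitWords q).2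

theorem splitWords_cons_upper (c : Char) (s : List Char) (hu : pvIsUpper c = true) :
    splitWords (c :: s) = (c :: (splitWords s).1, [] :: (splitWords s).2) := by
  simp [splitWords, hu]

theorem splitWords_cons_lower (c : Char) (s : List Char) (hu : pvIsUpper c = false) :
    splitWords (c :: s) = ((splitWords s).1, (c :: (splitWords s).2.headD []) :: (splitWords s).2.tail) := by
  simp [splitWords, hu]

theorem splitWords_snd_exists (s : List Char) :
    ∃ w0 ws, (splitWords s).2 = w0 :: ws := by
  induction s with
  | nil => exact ⟨[], [], rfl⟩
  | cons c s ih =>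
    obtain ⟨w0, ws, hw⟩ := ih
    by_cases hu : pvIsUpper c = true
    · exact ⟨[], w0 :: ws, by rw [splitWords_cons_upper c s hu, hw]⟩
    · refine ⟨c :: w0, ws, ?_⟩
      rw [splitWords_cons_lower c s (by simpa using hu)]
      simp [hw]

theorem bfun_nil (p : List Char) : bfun [] p = p.isEmpty := by
  induction p with
  | nil => simp [bfun, splitWords, allZipSubseqL, isSubseqL]
  | cons c p ih =>
    by_cases hu : pvIsUpper c = true
    · rw [bfun, splitWords_cons_upper c p hu]
      simp [splitWords]
    · obtain ⟨w0, ws, hw⟩ := splitWords_snd_exists p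
      rw [bfun, splitWords_cons_lower c p (by simpa using hu)]
      simp [hw, splitWords, allZipSubseqL, isSubseqL]

theorem aloop_eq_bfun (q p : List Char) : aloop q p = bfun q p := by
  induction q generalizing p with
  | nil => simpa [aloop] using (bfun_nil p).symm
  | cons c q ih =>
    obtain ⟨qw0, qws, hq⟩ := splitWords_snd_exists q
    by_cases hu : pvIsUpper c = true
    · -- c uppercase: query split gains cap c and empty leading word
      cases p with
      | nil =>
        simp only [aloop, bfun, splitWords_cons_upper c q hu]
        simp [matchOne_tail, hu, splitWords]
      | cons d p' =>
        by_cases hd : d = c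
        · subst hd
          simp only [aloop]
          rw [if_pos trivial]
          rw [ih p']
          simp [bfun, splitWords_cons_upper d q hu, splitWords_cons_upper d p' hu,
            allZipSubseqL, isSubseqL]
        · simp only [aloop, if_neg hd, if_pos hu]
          by_cases hdu : pvIsUpper d = true
          · simp [bfun, splitWords_cons_upper c q hu, splitWords_cons_upper d p' hdu]
            intro h
            exact absurd h.symm hd
          · obtain ⟨pw0, pws, hp⟩ := splitWords_snd_exists p'
            simp [bfun, splitWords_cons_upper c q hu,
              splitWords_cons_lower d p' (by simpa using hdu), hp, hq,
              allZipSubseqL, isSubseqL]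
    · -- c not uppercase: it is prepended to the leading query word
      have hu' : pvIsUpper c = false := by simpa using hu
      cases p with
      | nil =>
        have h1 : aloop (c :: q) [] = aloop q [] := by
          cases q with
          | nil => simp [aloop, matchOne_tail, hu']
          | cons e q' => simp [aloop, matchOne_tail, hu']
        rw [h1, ih []]
        simp only [bfun, splitWords_cons_lower c q hu']
        simp [hq, splitWords, allZipSubseqL, isSubseqL]
      | cons d p' =>
        by_cases hd : d = c
        · subst hd
          obtain ⟨pw0, pws, hp⟩ := splitWords_snd_exists p'
          simp only [aloop]
          rw [if_pos trivial]
          rw [ih p']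
          simp [bfun, splitWords_cons_lower d q hu', splitWords_cons_lower d p' hu',
            hp, hq, allZipSubseqL, isSubseqL]
        · simp only [aloop, if_neg hd, if_neg hu]
          rw [ih (d :: p')]
          by_cases hdu : pvIsUpper d = true
          · simp [bfun, splitWords_cons_lower c q hu', hq,
              splitWords_cons_upper d p' hdu, allZipSubseqL, isSubseqL]
          · obtain ⟨pw0, pws, hp⟩ := splitWords_snd_exists p'
            have hsub : isSubseqL (d :: pw0) (c :: qw0) = isSubseqL (d :: pw0) qw0 := by
              simp [isSubseqL, hd]
            simp [bfun, splitWords_cons_lower c q hu', hq,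
              splitWords_cons_lower d p' (by simpa using hdu), hp,
              allZipSubseqL, hsub]

theorem matchOne_loop_eq_aloop (plist qlist : List Char) (slow : Nat) (h : slow ≤ plist.length) :
    matchOne_loop plist qlist slow = aloop qlist (plist.drop slow) := by
  induction qlist generalizing slow with
  | nil =>
    simp only [matchOne_loop, aloop]
    by_cases hs : slow = plist.length
    · simp [hs]
    · simp [hs]
      omega
  | cons c rest ih =>
    by_cases hs : slow = plist.length
    · have : plist.drop slow = [] := by rw [List.drop_eq_nil_iff]; omega
      simp [matchOne_loop, aloop, hs]
    · have hlt : slow < plist.length := by omega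
      have hdrop : plist.drop slow = plist[slow] :: plist.drop (slow + 1) :=
        List.drop_eq_getElem_cons hlt
      have hget : plist[slow]? = some plist[slow] := List.getElem?_eq_getElem hlt
      simp only [matchOne_loop, if_neg hs, hdrop, aloop, hget]
      by_cases he : plist[slow] = c
      · simp [he, ih (slow + 1) (by omega)]
      · have hne : ¬ (some plist[slow] = some c) := by simpa using he
        simp only [if_neg he, if_neg hne]
        by_cases hup : pvIsUpper c = true
        · simp [hup]
        · have hih := ih slow (by omega)
          rw [hdrop] at hih
          simp [hup, hih]

theorem aloop_true_length (q p : List Char) (h : aloop q p = true) : p.length ≤ q.length := by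
  induction q generalizing p with
  | nil =>
    cases p with
    | nil => simp
    | cons d p' => simp [aloop] at h
  | cons c rest ih =>
    cases p with
    | nil => simp
    | cons d p' =>
      simp only [aloop] at h
      by_cases hd : d = c
      · rw [if_pos hd] at h
        have := ih p' h
        simpa using Nat.succ_le_succ this
      · rw [if_neg hd] at h
        by_cases hu : pvIsUpper c = true
        · simp [hu] at h
        · rw [if_neg hu] at h
          have := ih (d :: p') h
          simp at this ⊢
          omega

theorem splitWordsGo_eq (s : List Char) : ∀ (caps : List Char) (words : List (List Char)) (cur : List Char),
    splitWordsGo s caps words cur =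
      (caps ++ (splitWords s).1, words ++ ((cur ++ (splitWords s).2.headD []) :: (splitWords s).2.tail)) := by
  induction s with
  | nil => intro caps words cur; simp [splitWordsGo, splitWords]
  | cons c s ih =>
    intro caps words cur
    obtain ⟨w0, ws, hw⟩ := splitWords_snd_exists s
    by_cases hu : pvIsUpper c = true
    · rw [splitWordsGo, if_pos hu, ih, splitWords_cons_upper c s hu]
      simp [hw]
    · rw [splitWordsGo, if_neg hu, ih, splitWords_cons_lower c s (by simpa using hu)]
      simp [hw]

theorem splitWordsGo_nil_eq (s : List Char) : splitWordsGo s [] [] [] = splitWords s := by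
  obtain ⟨w0, ws, hw⟩ := splitWords_snd_exists s
  rw [splitWordsGo_eq]
  simp [hw]
  rw [← hw]

theorem isSubseqGo_eq (v w : List Char) : ∀ i : Nat, i ≤ v.length →
    decide (isSubseqGo v w i = v.length) = isSubseqL (v.drop i) w := by
  induction w with
  | nil =>
    intro i hi
    simp only [isSubseqGo]
    by_cases hs : i = v.length
    · have hd : v.drop i = [] := by rw [List.drop_eq_nil_iff]; omega
      simp [hs, isSubseqL]
    · have hlt : i < v.length := by omega
      rw [List.drop_eq_getElem_cons hlt]
      simp [hs, isSubseqL]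
  | cons c w ih =>
    intro i hi
    by_cases hs : i = v.length
    · have hd : v.drop i = [] := by rw [List.drop_eq_nil_iff]; omega
      have hg : ¬ (i < v.length ∧ v[i]? = some c) := fun hc => absurd hc.1 (by omega)
      have hstep : isSubseqGo v (c :: w) i = isSubseqGo v w i := by
        rw [isSubseqGo, if_neg hg]
      rw [hstep, ih i hi, hd]
      simp [isSubseqL]
    · have hlt : i < v.length := by omega
      have hdrop : v.drop i = v[i] :: v.drop (i + 1) := List.drop_eq_getElem_cons hlt
      have hget : v[i]? = some v[i] := List.getElem?_eq_getElem hlt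
      by_cases he : v[i] = c
      · have hg : i < v.length ∧ v[i]? = some c := ⟨hlt, by rw [hget, he]⟩
        have hstep : isSubseqGo v (c :: w) i = isSubseqGo v w (i + 1) := by
          rw [isSubseqGo, if_pos hg]
        rw [hstep, ih (i + 1) (by omega), hdrop]
        simp [isSubseqL, he]
      · have hg : ¬ (i < v.length ∧ v[i]? = some c) := by
          rintro ⟨-, h2⟩; rw [hget] at h2; exact he (by simpa using h2)
        have hstep : isSubseqGo v (c :: w) i = isSubseqGo v w i := by
          rw [isSubseqGo, if_neg hg]
        rw [hstep, ih i hi, hdrop]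
        simp [isSubseqL, he]

theorem isSubseq_eq (v w : List Char) : isSubseq v w = isSubseqL v w := by
  rw [isSubseq, isSubseqGo_eq v w 0 (Nat.zero_le _), List.drop_zero]

theorem allZipSubseq_eq (vs ws : List (List Char)) : allZipSubseq vs ws = allZipSubseqL vs ws := by
  induction vs generalizing ws with
  | nil => rfl
  | cons v vs ih =>
    cases ws with
    | nil => rfl
    | cons w ws => simp [allZipSubseq, allZipSubseqL, isSubseq_eq, ih]

theorem matchOne_alt_eq_bfun (query pattern : String) :
    matchOne_alt query pattern = bfun query.toList pattern.toList := by
  simp only [matchOne_alt, bfun, splitWordsGo_nil_eq, allZipSubseq_eq]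

-- ===== VERDICT (by name: the statement is the Claim_ definition above) =====
theorem matchOne_spec : Claim_equal_matchOne := by
  intro query pattern _
  unfold Spec_matchOne
  rw [matchOne_alt_eq_bfun, ← aloop_eq_bfun]
  unfold matchOne
  by_cases hlen : PySem.Str.len query < PySem.Str.len pattern
  · rw [if_pos hlen]
    have hlen' : query.toList.length < pattern.toList.length := by
      simpa [PySem.Str.len] using hlen
    by_contra hne
    have ht : aloop query.toList pattern.toList = true := by
      cases h : aloop query.toList pattern.toList with
      | false => exact absurd h.symm hne
      | true => rfl
    have := aloop_true_length _ _ ht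
    omega
  · rw [if_neg hlen]
    rw [matchOne_loop_eq_aloop pattern.toList query.toList 0 (Nat.zero_le _)]
    simp
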